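-- pv_equiv track=rewrite | github.com/k-harada/AtCoder | ABC/ABC182/C.py | solve
-- ===== SOURCE A (Python) =====
-- def solve(n):
--     mod3_cnt = [0] * 3
--     for s in str(n):
--         mod3_cnt[int(s) % 3] += 1
--     mod3_all = n % 3
--
--     if mod3_all == 0:
--         return 0
--     elif mod3_all == 1:
--         if mod3_cnt[1] > 0:
--             if len(str(n)) > 1:
--                 return 1
--             else:
--                 return -1
--         elif mod3_cnt[2] > 1:
--             if len(str(n)) > 2:
--                 return 2
--             else:
--                 return -1
--         else:
--             return -1
--     else:
--         if mod3_cnt[2] > 0: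
--             if len(str(n)) > 1:
--                 return 1
--             else:
--                 return -1
--         elif mod3_cnt[1] > 1:
--             if len(str(n)) > 2:
--                 return 2
--             else:
--                 return -1
--         else:
--             return -1
-- ===== SOURCE B (Python) =====
-- def solve(n):
--     # DP over the digits of str(n): (a, b, c) = minimum number of digits deleted so that
--     # the kept digit sum has residue zero / one / two mod three (inf = impossible).
--     # At least one digit must be kept, so a == len(s) (delete everything) also means impossible.
--     s = str(n)
--     inf = len(s) + 1
--     a, b, c = 0, inf, inf
--     for ch in s:
--         d = int(ch) % 3
--         if d == 0:
--             pass
--         elif d == 1: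
--             a, b, c = min(a + 1, c), min(b + 1, a), min(c + 1, b)
--         else:
--             a, b, c = min(a + 1, b), min(b + 1, c), min(c + 1, a)
--     return a if a < len(s) else -1
-- ===== Notes on version B (the rewrite author's own statement) =====
-- stated objective: alternative
-- what changed: A counts digit residues and decides via a hand-written case analysis on the number's residue, the counts and the digit count; B instead runs a three-state dynamic program over the digits (minimum deletions for each kept-sum residue modulo three), reads off the divisible state, and reports impossibility when reaching it would require deleting every digit.
import Mathlib
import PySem

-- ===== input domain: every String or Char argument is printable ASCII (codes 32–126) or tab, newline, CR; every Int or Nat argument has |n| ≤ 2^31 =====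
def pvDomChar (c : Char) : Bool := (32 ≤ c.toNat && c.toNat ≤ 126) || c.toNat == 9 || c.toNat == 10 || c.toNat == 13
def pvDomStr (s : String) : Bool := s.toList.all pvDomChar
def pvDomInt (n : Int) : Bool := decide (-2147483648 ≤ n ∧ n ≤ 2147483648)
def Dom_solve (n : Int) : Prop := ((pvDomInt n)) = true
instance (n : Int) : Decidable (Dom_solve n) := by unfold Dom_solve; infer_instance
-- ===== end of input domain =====

-- B replaces A's residue-count case analysis by a 3-state DP over the digits (min deletions
-- per kept-sum residue): an alternative algorithm of the same cost.


-- ===== PORT A =====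
def solve (n : Int) : Int :=
  let s := PySem.Int.toStr n
  let mod3_cnt := s.toList.foldl (fun (cnt : List Int) ch =>
      match PySem.Int.ofChars? [ch] with
      | some v => let i := (PySem.Int.mod v 3).toNat
                  cnt.set i (cnt.getD i 0 + 1)
      | none => cnt      -- int(ch) raises ValueError here (the '-' of a negative n); Pre_solve excludes those inputs
    ) [0, 0, 0]
  let mod3_all := PySem.Int.mod n 3
  if mod3_all = 0 then 0
  else if mod3_all = 1 then
    if mod3_cnt.getD 1 0 > 0 then (if PySem.Str.len s > 1 then 1 else -1)
    else if mod3_cnt.getD 2 0 > 1 then (if PySem.Str.len s > 2 then 2 else -1)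
    else -1
  else
    if mod3_cnt.getD 2 0 > 0 then (if PySem.Str.len s > 1 then 1 else -1)
    else if mod3_cnt.getD 1 0 > 1 then (if PySem.Str.len s > 2 then 2 else -1)
    else -1

-- ===== PORT B =====
def solve_alt (n : Int) : Int :=
  let s := PySem.Int.toStr n
  let inf := PySem.Str.len s + 1
  let abc := s.toList.foldl (fun (abc : Int × Int × Int) ch =>
      let d := match PySem.Int.ofChars? [ch] with
               | some v => PySem.Int.mod v 3
               | none => (0 : Int)   -- int(ch) raises ValueError here in Python B too; Pre_solve excludes
      if d = 0 then abc
      else if d = 1 then (min (abc.1 + 1) abc.2.2, min (abc.2.1 + 1) abc.1, min (abc.2.2 + 1) abc.2.1)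
      else (min (abc.1 + 1) abc.2.1, min (abc.2.1 + 1) abc.2.2, min (abc.2.2 + 1) abc.1)
    ) (0, inf, inf)
  if abc.1 < PySem.Str.len s then abc.1 else -1

-- ===== PRECONDITION & SPEC =====
-- Pre_ excludes exactly n < 0, where Python A (and B) raise ValueError on int('-').
def Pre_solve (n : Int) : Prop := 0 ≤ n
instance (n : Int) : Decidable (Pre_solve n) := by unfold Pre_solve; infer_instance
def pvWitness_solve : Int := 12
def Spec_solve (n : Int) (out : Int) : Prop := out = solve_alt n
instance (n : Int) (out : Int) : Decidable (Spec_solve n out) := by unfold Spec_solve; infer_instance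

-- ===== CLAIM (what is proved, stated in full; the proofs are below) =====
def Claim_equal_solve : Prop := ∀ (n : Int), Dom_solve n → Pre_solve n → Spec_solve n (solve n)

-- ===== LEMMAS AND PROOFS =====

-- digits of m, most significant first (the digit values behind Nat.toDigits 10 m)
def digitsOf (m : Nat) : List Nat := if m = 0 then [0] else (Nat.digits 10 m).reverse

theorem digitChar_ofChars (d : Nat) (hd : d < 10) :
    PySem.Int.ofChars? [d.digitChar] = some (d : Int) := by
  interval_cases d <;> decide

theorem toDigitsCore_eq : ∀ (fuel n : Nat) (ds : List Char), n < fuel → 0 < n →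
    Nat.toDigitsCore 10 fuel n ds = ((Nat.digits 10 n).map Nat.digitChar).reverse ++ ds := by
  intro fuel
  induction fuel with
  | zero => intro n ds h; omega
  | succ fuel ih =>
    intro n ds hlt hpos
    rw [Nat.toDigitsCore]
    rw [Nat.digits_def' (by norm_num : (1:Nat) < 10) hpos]
    by_cases h : n / 10 = 0
    · simp [h, Nat.digits_zero]
    · rw [if_neg h]
      rw [ih (n / 10) ((n % 10).digitChar :: ds)
        (by have := Nat.div_lt_self hpos (by norm_num : (1:Nat) < 10); omega)
        (Nat.pos_of_ne_zero h)]
      simp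

theorem toDigits_eq_digitsOf (m : Nat) :
    Nat.toDigits 10 m = (digitsOf m).map Nat.digitChar := by
  by_cases hm : m = 0
  · subst hm; decide
  · unfold Nat.toDigits digitsOf
    rw [if_neg hm, toDigitsCore_eq (m + 1) m [] (by omega) (Nat.pos_of_ne_zero hm)]
    simp [List.map_reverse]

theorem digitsOf_ne_nil (m : Nat) : digitsOf m ≠ [] := by
  unfold digitsOf
  split
  · simp
  · simp [Nat.digits_ne_nil_iff_ne_zero, *]

theorem digitsOf_lt (m : Nat) : ∀ d ∈ digitsOf m, d < 10 := by
  unfold digitsOf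
  split
  · simp
  · intro d hd
    exact Nat.digits_lt_base (by norm_num) (List.mem_reverse.mp hd)

theorem digitsOf_sum_mod (m : Nat) : (digitsOf m).sum % 3 = m % 3 := by
  unfold digitsOf
  split
  · simp [*]
  · rw [List.sum_reverse]
    have h1 := Nat.ofDigits_modEq 10 3 (Nat.digits 10 m)
    rw [Nat.ofDigits_digits] at h1
    have : (10 : Nat) % 3 = 1 := by norm_num
    rw [this, Nat.ofDigits_one] at h1
    exact h1.symm

-- residue counts of a digit list
def r1 (ds : List Nat) : Nat := ds.countP (fun d => d % 3 == 1)
def r2 (ds : List Nat) : Nat := ds.countP (fun d => d % 3 == 2)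

theorem sum_mod3_eq (ds : List Nat) : ds.sum % 3 = (r1 ds + 2 * r2 ds) % 3 := by
  induction ds with
  | nil => rfl
  | cons d ds ih =>
    have h3 : d % 3 = 0 ∨ d % 3 = 1 ∨ d % 3 = 2 := by omega
    rcases h3 with h | h | h <;>
      · simp only [r1, r2] at ih ⊢
        simp [h]
        omega

-- A's counting step and loop, over the digit values
def stepA (cnt : List Int) (d : Nat) : List Int := cnt.set (d % 3) (cnt.getD (d % 3) 0 + 1)

theorem foldA_core : ∀ (ds : List Nat) (x y z : Int),
    ds.foldl stepA [x, y, z]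
      = [x + ((ds.countP (fun d => d % 3 == 0) : Nat) : Int), y + (r1 ds : Int), z + (r2 ds : Int)] := by
  intro ds
  induction ds with
  | nil => intro x y z; simp [r1, r2]
  | cons d ds ih =>
    intro x y z
    have h3 : d % 3 = 0 ∨ d % 3 = 1 ∨ d % 3 = 2 := by omega
    rcases h3 with h | h | h
    · rw [List.foldl_cons, show stepA [x, y, z] d = [x + 1, y, z] by simp [stepA, h], ih]
      simp only [r1, r2, List.countP_cons, h, beq_iff_eq, List.cons.injEq, and_true]
      norm_num
      omega
    · rw [List.foldl_cons, show stepA [x, y, z] d = [x, y + 1, z] by simp [stepA, h], ih]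
      simp only [r1, r2, List.countP_cons, h, beq_iff_eq, List.cons.injEq, and_true]
      norm_num
      omega
    · rw [List.foldl_cons, show stepA [x, y, z] d = [x, y, z + 1] by simp [stepA, h], ih]
      simp only [r1, r2, List.countP_cons, h, beq_iff_eq, List.cons.injEq, and_true]
      norm_num
      omega

-- B's DP state after a digit list ds: value j ↦ min deletions so kept sum ≡ j (mod 3)
def W (L : Int) (a b j : Nat) : Int :=
  if j = 0 then 0
  else if j = 1 then (if 1 ≤ a then 1 else if 2 ≤ b then 2 else L + 1)
  else (if 1 ≤ b then 1 else if 2 ≤ a then 2 else L + 1)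

def bstep (abc : Int × Int × Int) (d : Nat) : Int × Int × Int :=
  if d % 3 = 0 then abc
  else if d % 3 = 1 then (min (abc.1 + 1) abc.2.2, min (abc.2.1 + 1) abc.1, min (abc.2.2 + 1) abc.2.1)
  else (min (abc.1 + 1) abc.2.1, min (abc.2.1 + 1) abc.2.2, min (abc.2.2 + 1) abc.1)

theorem Wstep1 (L : Int) (A B : Nat) (hA : (A : Int) ≤ L - 1) (hB : (B : Int) ≤ L - 1) :
    min (W L A B ((A + 2 * B) % 3) + 1) (W L A B ((A + 2 * B + 1) % 3)) =
        W L (A + 1) B ((A + 1 + 2 * B) % 3) ∧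
      min (W L A B ((A + 2 * B + 2) % 3) + 1) (W L A B ((A + 2 * B) % 3)) =
          W L (A + 1) B ((A + 1 + 2 * B + 2) % 3) ∧
        min (W L A B ((A + 2 * B + 1) % 3) + 1) (W L A B ((A + 2 * B + 2) % 3)) =
          W L (A + 1) B ((A + 1 + 2 * B + 1) % 3) := by
  have hK : (A + 2 * B) % 3 = 0 ∨ (A + 2 * B) % 3 = 1 ∨ (A + 2 * B) % 3 = 2 := by omega
  rcases hK with hk | hk | hk
  · rw [show (A + 2 * B + 1) % 3 = 1 by omega, show (A + 2 * B + 2) % 3 = 2 by omega,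
      show (A + 1 + 2 * B) % 3 = 1 by omega, show (A + 1 + 2 * B + 2) % 3 = 0 by omega,
      show (A + 1 + 2 * B + 1) % 3 = 2 by omega, hk]
    simp only [W]
    norm_num
    split_ifs <;> omega
  · rw [show (A + 2 * B + 1) % 3 = 2 by omega, show (A + 2 * B + 2) % 3 = 0 by omega,
      show (A + 1 + 2 * B) % 3 = 2 by omega, show (A + 1 + 2 * B + 2) % 3 = 1 by omega,
      show (A + 1 + 2 * B + 1) % 3 = 0 by omega, hk]
    simp only [W]
    norm_num
    split_ifs <;> omega
  · rw [show (A + 2 * B + 1) % 3 = 0 by omega, show (A + 2 * B + 2) % 3 = 1 by omega,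
      show (A + 1 + 2 * B) % 3 = 0 by omega, show (A + 1 + 2 * B + 2) % 3 = 2 by omega,
      show (A + 1 + 2 * B + 1) % 3 = 1 by omega, hk]
    simp only [W]
    norm_num
    split_ifs <;> omega

theorem Wstep2 (L : Int) (A B : Nat) (hA : (A : Int) ≤ L - 1) (hB : (B : Int) ≤ L - 1) :
    min (W L A B ((A + 2 * B) % 3) + 1) (W L A B ((A + 2 * B + 2) % 3)) =
        W L A (B + 1) ((A + 2 * (B + 1)) % 3) ∧
      min (W L A B ((A + 2 * B + 2) % 3) + 1) (W L A B ((A + 2 * B + 1) % 3)) =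
          W L A (B + 1) ((A + 2 * (B + 1) + 2) % 3) ∧
        min (W L A B ((A + 2 * B + 1) % 3) + 1) (W L A B ((A + 2 * B) % 3)) =
          W L A (B + 1) ((A + 2 * (B + 1) + 1) % 3) := by
  have hK : (A + 2 * B) % 3 = 0 ∨ (A + 2 * B) % 3 = 1 ∨ (A + 2 * B) % 3 = 2 := by omega
  rcases hK with hk | hk | hk
  · rw [show (A + 2 * B + 1) % 3 = 1 by omega, show (A + 2 * B + 2) % 3 = 2 by omega,
      show (A + 2 * (B + 1)) % 3 = 2 by omega, show (A + 2 * (B + 1) + 2) % 3 = 1 by omega,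
      show (A + 2 * (B + 1) + 1) % 3 = 0 by omega, hk]
    simp only [W]
    norm_num
    split_ifs <;> omega
  · rw [show (A + 2 * B + 1) % 3 = 2 by omega, show (A + 2 * B + 2) % 3 = 0 by omega,
      show (A + 2 * (B + 1)) % 3 = 0 by omega, show (A + 2 * (B + 1) + 2) % 3 = 2 by omega,
      show (A + 2 * (B + 1) + 1) % 3 = 1 by omega, hk]
    simp only [W]
    norm_num
    split_ifs <;> omega
  · rw [show (A + 2 * B + 1) % 3 = 0 by omega, show (A + 2 * B + 2) % 3 = 1 by omega,
      show (A + 2 * (B + 1)) % 3 = 1 by omega, show (A + 2 * (B + 1) + 2) % 3 = 0 by omega,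
      show (A + 2 * (B + 1) + 1) % 3 = 2 by omega, hk]
    simp only [W]
    norm_num
    split_ifs <;> omega

set_option maxHeartbeats 1000000 in
theorem foldB_core (L : Int) : ∀ (ds : List Nat), (ds.length : Int) ≤ L →
    ds.foldl bstep (0, L + 1, L + 1)
      = (W L (r1 ds) (r2 ds) ((r1 ds + 2 * r2 ds) % 3),
         W L (r1 ds) (r2 ds) (((r1 ds + 2 * r2 ds) % 3 + 2) % 3),
         W L (r1 ds) (r2 ds) (((r1 ds + 2 * r2 ds) % 3 + 1) % 3)) := by
  intro ds
  induction ds using List.reverseRecOn with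
  | nil => intro _; simp [r1, r2, W]
  | append_singleton ds d ih =>
    intro hlen
    have hlen' : (ds.length : Int) ≤ L - 1 := by
      simp only [List.length_append, List.length_cons, List.length_nil] at hlen
      push_cast at hlen
      omega
    rw [List.foldl_append, ih (by omega), List.foldl_cons, List.foldl_nil]
    have ha : r1 ds ≤ ds.length := List.countP_le_length
    have hb : r2 ds ≤ ds.length := List.countP_le_length
    have h3 : d % 3 = 0 ∨ d % 3 = 1 ∨ d % 3 = 2 := by omega
    rcases h3 with h | h | h
    · have hr1 : r1 (ds ++ [d]) = r1 ds := by simp [r1, List.countP_append, h]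
      have hr2 : r2 (ds ++ [d]) = r2 ds := by simp [r2, List.countP_append, h]
      rw [hr1, hr2]
      simp [bstep, h]
    · have hr1 : r1 (ds ++ [d]) = r1 ds + 1 := by simp [r1, List.countP_append, h]
      have hr2 : r2 (ds ++ [d]) = r2 ds := by simp [r2, List.countP_append, h]
      rw [hr1, hr2]
      simp only [bstep, h]
      norm_num
      exact Wstep1 L (r1 ds) (r2 ds) (by omega) (by omega)
    · have hr1 : r1 (ds ++ [d]) = r1 ds := by simp [r1, List.countP_append, h]
      have hr2 : r2 (ds ++ [d]) = r2 ds + 1 := by simp [r2, List.countP_append, h]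
      rw [hr1, hr2]
      simp only [bstep, h]
      norm_num
      exact Wstep2 L (r1 ds) (r2 ds) (by omega) (by omega)

-- the port loops, rewritten onto the digit values
theorem foldA_map (ds : List Nat) (h10 : ∀ d ∈ ds, d < 10) (init : List Int) :
    (ds.map Nat.digitChar).foldl (fun (cnt : List Int) ch =>
        match PySem.Int.ofChars? [ch] with
        | some v => let i := (PySem.Int.mod v 3).toNat
                    cnt.set i (cnt.getD i 0 + 1)
        | none => cnt) init
      = ds.foldl stepA init := by
  rw [List.foldl_map]
  apply PySem.List.foldl_congr_mem
  intro cnt d hd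
  rw [digitChar_ofChars d (h10 d hd)]
  have hm : PySem.Int.mod (d : Int) 3 = ((d % 3 : Nat) : Int) := by
    rw [show (3 : Int) = ((3 : Nat) : Int) from rfl, PySem.Int.mod_natCast]
  have h2 : (PySem.Int.mod (d : Int) 3).toNat = d % 3 := by rw [hm]; omega
  have h3 : (((d : Int)) % 3).toNat = d % 3 := by omega
  simp [stepA, h3]

theorem foldB_map (ds : List Nat) (h10 : ∀ d ∈ ds, d < 10) (init : Int × Int × Int) :
    (ds.map Nat.digitChar).foldl (fun (abc : Int × Int × Int) ch =>
        let d := match PySem.Int.ofChars? [ch] with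
                 | some v => PySem.Int.mod v 3
                 | none => (0 : Int)
        if d = 0 then abc
        else if d = 1 then (min (abc.1 + 1) abc.2.2, min (abc.2.1 + 1) abc.1, min (abc.2.2 + 1) abc.2.1)
        else (min (abc.1 + 1) abc.2.1, min (abc.2.1 + 1) abc.2.2, min (abc.2.2 + 1) abc.1)) init
      = ds.foldl bstep init := by
  rw [List.foldl_map]
  apply PySem.List.foldl_congr_mem
  intro abc d hd
  rw [digitChar_ofChars d (h10 d hd)]
  have hm : PySem.Int.mod (d : Int) 3 = ((d % 3 : Nat) : Int) := by
    rw [show (3 : Int) = ((3 : Nat) : Int) from rfl, PySem.Int.mod_natCast]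
  have h3 : d % 3 = 0 ∨ d % 3 = 1 ∨ d % 3 = 2 := by omega
  rcases h3 with h | h | h <;>
    · simp only [hm, h, bstep]
      norm_num

-- ===== VERDICT (by name: the statement is the Claim_ definition above) =====
theorem solve_spec : Claim_equal_solve := by
  intro n _ hpre
  unfold Spec_solve
  obtain ⟨m, rfl⟩ : ∃ m : Nat, n = (m : Int) := ⟨n.toNat, (Int.toNat_of_nonneg hpre).symm⟩
  have hchars : (PySem.Int.toStr (m : Int)).toList = (digitsOf m).map Nat.digitChar := by
    rw [PySem.Int.toList_toStr]
    unfold PySem.Int.toChars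
    rw [if_neg (by omega : ¬ ((m : Int) < 0))]
    simpa using toDigits_eq_digitsOf m
  set ds := digitsOf m with hds
  have h10 := digitsOf_lt m
  have hne := digitsOf_ne_nil m
  have hlen1 : 1 ≤ ds.length := List.length_pos_of_ne_nil hne
  have hLeq : PySem.Str.len (PySem.Int.toStr (m : Int)) = (ds.length : Int) := by
    rw [PySem.Str.len_eq, hchars]; simp
  have hmod : PySem.Int.mod (m : Int) 3 = (((r1 ds + 2 * r2 ds) % 3 : Nat) : Int) := by
    have := digitsOf_sum_mod m
    have h2 := sum_mod3_eq ds
    have : m % 3 = (r1 ds + 2 * r2 ds) % 3 := by rw [← this, ← hds] at *; omega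
    rw [show ((3:Int) = ((3:Nat):Int)) from rfl, PySem.Int.mod_natCast, this]
  unfold solve solve_alt
  simp only [hchars, hLeq]
  rw [foldA_map ds h10, foldB_map ds h10, foldA_core, foldB_core (ds.length : Int) ds le_rfl]
  rw [hmod]
  simp only [zero_add, List.getD_cons_succ, List.getD_cons_zero]
  have ha : r1 ds ≤ ds.length := List.countP_le_length
  have hb : r2 ds ≤ ds.length := List.countP_le_length
  have h3 : (r1 ds + 2 * r2 ds) % 3 = 0 ∨ (r1 ds + 2 * r2 ds) % 3 = 1 ∨
      (r1 ds + 2 * r2 ds) % 3 = 2 := by omega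
  rcases h3 with h | h | h <;>
    · rw [h]
      simp only [W]
      norm_num
      try split_ifs
      all_goals omega
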